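-- pv_equiv track=rewrite | github.com/bijeshofficial/coding_solutions | LeetCode/1614_Maximum_Nesting_Depth_of_the_Parentheses.py | maxDepth
-- ===== SOURCE A (Python) =====
-- def maxDepth(s: str) -> int:
--     counter = 0
--     ans = []
--     for i in s:
--         if i == '(':
--             counter += 1
--         elif i == ')':
--             ans.append(counter)
--             counter -= 1
--     ans.append(counter)
--     return max(ans)
-- ===== SOURCE B (Python) =====
-- def maxDepth(s: str) -> int:
--     # Divide and conquer: a segment reduces to (total delta, max delta-sum over its
--     # nonempty prefixes); segments combine associatively, answer = max(0, best prefix).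
--     def scan(t):
--         if len(t) == 1:
--             d = 1 if t == '(' else -1 if t == ')' else 0
--             return (d, d)
--         m = len(t) // 2
--         tl, ml = scan(t[:m])
--         tr, mr = scan(t[m:])
--         return (tl + tr, max(ml, tl + mr))
--     if not s:
--         return 0
--     return max(0, scan(s)[1])
-- ===== Notes on version B (the rewrite author's own statement) =====
-- stated objective: alternative
-- what changed: Replaces A's single linear branch-and-collect loop (append counter at each ')' then max) with a recursive divide-and-conquer: each half of the string reduces to a (total delta, max nonempty-prefix delta sum) pair, the pairs combine associatively, and the answer is max(0, best prefix).
import Mathlib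
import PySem

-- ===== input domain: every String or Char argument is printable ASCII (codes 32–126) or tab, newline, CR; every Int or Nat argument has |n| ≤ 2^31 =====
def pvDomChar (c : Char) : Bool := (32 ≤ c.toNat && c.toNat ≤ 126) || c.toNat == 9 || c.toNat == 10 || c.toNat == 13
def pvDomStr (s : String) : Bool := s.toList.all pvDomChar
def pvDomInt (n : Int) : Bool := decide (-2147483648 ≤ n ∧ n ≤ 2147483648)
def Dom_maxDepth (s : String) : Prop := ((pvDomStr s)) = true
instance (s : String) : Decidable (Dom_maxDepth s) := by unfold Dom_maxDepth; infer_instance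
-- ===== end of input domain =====

-- B replaces A's linear branch-and-collect loop with a divide-and-conquer reduction:
-- each half reduces to (total delta, max nonempty-prefix delta sum) and the pairs combine; alternative algorithm, same exact value.

-- ===== PORT A =====
def maxDepth (s : String) : Int :=
  -- counter/ans loop: on ')' append counter before decrementing; finally append counter and take max
  let st := s.toList.foldl (fun (p : Int × List Int) i =>
    if i = '(' then (p.1 + 1, p.2)
    else if i = ')' then (p.1 - 1, p.2 ++ [p.1])
    else p) (0, [])
  ((PySem.List.max? (st.2 ++ [st.1]) (fun x => x)).getD 0)

-- ===== PORT B =====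
-- d = 1 if t == '(' else -1 if t == ')' else 0
def pvDeltaB (c : Char) : Int := if c = '(' then 1 else if c = ')' then -1 else 0

-- scan(t): divide a nonempty segment at m = len//2; each side yields
-- (total delta, max prefix delta-sum); combine as (tl+tr, max(ml, tl+mr)).
def pvScan (l : List Char) : Int × Int :=
  if _h : l.length ≤ 1 then
    match l with
    | [] => (0, 0)          -- unreachable: scan is only called on nonempty segments
    | c :: _ => (pvDeltaB c, pvDeltaB c)
  else
    let m := l.length / 2
    let p := pvScan (l.take m)
    let q := pvScan (l.drop m)
    (p.1 + q.1, max p.2 (p.1 + q.2))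
termination_by l.length
decreasing_by
  · simp only [List.length_take]; omega
  · simp only [List.length_drop]; omega

def maxDepth_alt (s : String) : Int :=
  if s.toList = [] then 0 else max 0 (pvScan s.toList).2

-- ===== PRECONDITION & SPEC =====
def Spec_maxDepth (s : String) (out : Int) : Prop := out = maxDepth_alt s
instance (s : String) (out : Int) : Decidable (Spec_maxDepth s out) := by unfold Spec_maxDepth; infer_instance

-- ===== CLAIM (what is proved, stated in full; the proofs are below) =====
def Claim_equal_maxDepth : Prop := ∀ (s : String), Dom_maxDepth s → Spec_maxDepth s (maxDepth s)

-- ===== LEMMAS AND PROOFS =====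

-- delta of one character (A-analysis view)
def pvDelta (c : Char) : Int := (if c = '(' then 1 else 0) - (if c = ')' then 1 else 0)

theorem pvDeltaB_eq (c : Char) : pvDeltaB c = pvDelta c := by
  unfold pvDeltaB pvDelta
  by_cases h1 : c = '(' <;> by_cases h2 : c = ')' <;> simp [h1, h2]

-- recursive description of A's loop state starting from counter cnt (final counter, appended values)
def pvAnsFin (cnt : Int) : List Char → Int × List Int
  | [] => (cnt, [])
  | c :: l =>
    if c = '(' then pvAnsFin (cnt + 1) l
    else if c = ')' then
      let r := pvAnsFin (cnt - 1) l
      (r.1, cnt :: r.2)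
    else pvAnsFin cnt l

-- prefix sums of the deltas starting after value cur
def pvPref (cur : Int) : List Char → List Int
  | [] => []
  | c :: l => (cur + pvDelta c) :: pvPref (cur + pvDelta c) l

-- max of a nonempty list (0 for [])
def pvLMax : List Int → Int
  | [] => 0
  | a :: t => t.foldl max a

-- max delta-sum over the nonempty prefixes of a nonempty list
def pvMP : List Char → Int
  | [] => 0
  | [c] => pvDelta c
  | c :: l => max (pvDelta c) (pvDelta c + pvMP (l))

theorem pvMP_cons (c : Char) (l : List Char) (h : l ≠ []) :
    pvMP (c :: l) = max (pvDelta c) (pvDelta c + pvMP l) := by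
  cases l with
  | nil => exact absurd rfl h
  | cons d t => rfl

theorem pv_foldl_max_max (l : List Int) : ∀ (a b : Int),
    l.foldl max (max a b) = max a (l.foldl max b) := by
  induction l with
  | nil => intro a b; simp [List.foldl]
  | cons c l ih =>
    intro a b
    simp only [List.foldl]
    rw [max_assoc, ih]

theorem pv_lMax_cons (x z : Int) (l : List Int) :
    pvLMax (x :: (l ++ [z])) = max x (pvLMax (l ++ [z])) := by
  cases l with
  | nil => simp [pvLMax]
  | cons a l' =>
    simp only [pvLMax, List.cons_append, List.foldl]
    rw [pv_foldl_max_max]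

theorem pv_foldA (l : List Char) : ∀ (cnt : Int) (ans : List Int),
    l.foldl (fun (p : Int × List Int) i =>
      if i = '(' then (p.1 + 1, p.2)
      else if i = ')' then (p.1 - 1, p.2 ++ [p.1])
      else p) (cnt, ans)
    = ((pvAnsFin cnt l).1, ans ++ (pvAnsFin cnt l).2) := by
  induction l with
  | nil => intro cnt ans; simp [pvAnsFin]
  | cons c l ih =>
    intro cnt ans
    by_cases h1 : c = '('
    · simp [h1, List.foldl, pvAnsFin, ih]
    · by_cases h2 : c = ')'
      · simp [h2, List.foldl, pvAnsFin, ih]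
      · simp [h1, h2, List.foldl, pvAnsFin, ih]

theorem pv_main (l : List Char) : ∀ (cnt : Int),
    pvLMax ((pvAnsFin cnt l).2 ++ [(pvAnsFin cnt l).1]) = (pvPref cnt l).foldl max cnt := by
  induction l with
  | nil => intro cnt; simp [pvAnsFin, pvPref, pvLMax]
  | cons c l ih =>
    intro cnt
    by_cases h1 : c = '('
    · subst h1
      simp [pvAnsFin, pvPref, pvDelta]
      rw [ih (cnt + 1)]
    · by_cases h2 : c = ')'
      · subst h2
        simp [pvAnsFin, pvPref, pvDelta]
        rw [pv_lMax_cons, ih (cnt - 1), ← pv_foldl_max_max,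
            max_eq_left (by omega : cnt - 1 ≤ cnt),
            show cnt + -1 = cnt - 1 from by ring]
      · simp [pvAnsFin, pvPref, pvDelta, if_neg h1, if_neg h2]
        rw [ih cnt]

theorem pv_maxGetD (l : List Int) (z : Int) :
    ((PySem.List.max? (l ++ [z]) (fun x => x)).getD 0) = pvLMax (l ++ [z]) := by
  cases l with
  | nil => simp [PySem.List.max?_id_cons, pvLMax]
  | cons a t =>
    simp only [List.cons_append]
    rw [PySem.List.max?_id_cons]
    simp [pvLMax]

-- foldl max over the prefix sums = max of the seed and cur + best nonempty prefix
theorem pv_pref_foldl (l : List Char) (h : l ≠ []) : ∀ (a cur : Int),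
    (pvPref cur l).foldl max a = max a (cur + pvMP l) := by
  induction l with
  | nil => exact absurd rfl h
  | cons c l ih =>
    intro a cur
    cases hl : l with
    | nil => simp [pvPref, pvMP, List.foldl]
    | cons d t =>
      have hne : l ≠ [] := by simp [hl]
      rw [← hl]
      simp only [pvPref, List.foldl]
      rw [ih hne, pvMP_cons c l hne, ← max_add_add_left, ← max_assoc]
      congr 1
      ring

-- total delta and best-prefix of a concatenation of nonempty lists
theorem pv_mp_append (l1 : List Char) (h1 : l1 ≠ []) (l2 : List Char) (h2 : l2 ≠ []) :
    pvMP (l1 ++ l2) = max (pvMP l1) ((l1.map pvDelta).sum + pvMP l2) := by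
  induction l1 with
  | nil => exact absurd rfl h1
  | cons c l ih =>
    cases hl : l with
    | nil =>
      subst hl
      simp only [List.cons_append, List.nil_append, List.map, List.sum_cons, List.sum_nil]
      rw [pvMP_cons c l2 h2]
      simp [pvMP]
    | cons d t =>
      have hne : l ≠ [] := by simp [hl]
      rw [← hl]
      have hne2 : l ++ l2 ≠ [] := by cases l <;> simp_all
      simp only [List.cons_append]
      rw [pvMP_cons c (l ++ l2) hne2, ih hne, pvMP_cons c l hne]
      simp only [List.map, List.sum_cons]
      rw [← max_add_add_left, ← max_assoc]
      congr 1
      ring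

-- pvScan computes (total delta, best nonempty prefix) on every nonempty list
theorem pvScan_spec (n : ℕ) : ∀ (l : List Char), l.length ≤ n → l ≠ [] →
    pvScan l = ((l.map pvDelta).sum, pvMP l) := by
  induction n with
  | zero => intro l hn hne; cases l with
    | nil => exact absurd rfl hne
    | cons c t => simp at hn
  | succ n ih =>
    intro l hn hne
    by_cases h1 : l.length ≤ 1
    · cases l with
      | nil => exact absurd rfl hne
      | cons c t =>
        cases t with
        | nil => simp [pvScan, pvMP, pvDeltaB_eq]
        | cons d t' => simp at h1
    · rw [pvScan, dif_neg h1]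
      dsimp only
      have hlen : 2 ≤ l.length := by omega
      set m := l.length / 2 with hm
      have hm1 : 1 ≤ m := by omega
      have hmlt : m < l.length := by omega
      have htk : (l.take m).length = m := by simp; omega
      have hdp : (l.drop m).length = l.length - m := by simp
      have htne : l.take m ≠ [] := by
        intro h; rw [h] at htk; simp at htk; omega
      have hdne : l.drop m ≠ [] := by
        intro h; rw [h] at hdp; simp at hdp; omega
      rw [ih (l.take m) (by omega) htne, ih (l.drop m) (by omega) hdne]
      have hsplit : l = l.take m ++ l.drop m := (List.take_append_drop m l).symm
      dsimp only
      rw [Prod.mk.injEq]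
      constructor
      · conv_rhs => rw [hsplit]
        simp
      · conv_rhs => rw [hsplit]
        rw [pv_mp_append (l.take m) htne (l.drop m) hdne]

-- ===== VERDICT (by name: the statement is the Claim_ definition above) =====
theorem maxDepth_spec : Claim_equal_maxDepth := by
  intro s _
  unfold Spec_maxDepth maxDepth maxDepth_alt
  dsimp only
  rw [pv_foldA]
  dsimp only
  simp only [List.nil_append]
  rw [pv_maxGetD, pv_main]
  cases hl : s.toList with
  | nil => simp [pvPref]
  | cons c t =>
    rw [if_neg (by simp)]
    rw [pv_pref_foldl (c :: t) (by simp) 0 0,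
        pvScan_spec (c :: t).length (c :: t) le_rfl (by simp)]
    simp
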